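-- pv_equiv track=rewrite | github.com/deferredreward/TAtoNotion | migration_v7.py | get_key_concepts
-- ===== SOURCE A (Python) =====
-- from typing import Dict, List, Optional
--
-- def get_key_concepts(article_id: str, content: str) -> List[str]:
--     """Extract key concepts from article."""
--     concepts = []
--     content_lower = content.lower()
--
--     if 'figs-' in article_id or any(word in content_lower for word in ['metaphor', 'simile']):
--         concepts.append('Figures of Speech')
--     if 'grammar-' in article_id or any(word in content_lower for word in ['verb', 'sentence']):
--         concepts.append('Grammar')
--     if any(word in content_lower for word in ['translation', 'translate', 'meaning']):
--         concepts.append('Translation Principles')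
--     if any(word in content_lower for word in ['check', 'review', 'accuracy']):
--         concepts.append('Quality Assurance')
--     if any(word in content_lower for word in ['team', 'leader', 'collaborate']):
--         concepts.append('Team Management')
--     if any(word in content_lower for word in ['culture', 'cultural', 'context']):
--         concepts.append('Cultural Context')
--     if any(word in content_lower for word in ['church', 'pastor', 'leader']):
--         concepts.append('Church Involvement')
--     if any(word in content_lower for word in ['source', 'original', 'hebrew', 'greek']):
--         concepts.append('Source Texts')
--
--     return concepts
-- ===== SOURCE B (Python) =====
-- # Inverted index: one scan of (pattern -> label) pairs collects the set of hit labels,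
-- # then the canonical label order is filtered by membership in that set.
-- ID_PREFIX_INDEX = [('figs-', 'Figures of Speech'), ('grammar-', 'Grammar')]
-- KEYWORD_INDEX = [
--     ('metaphor', 'Figures of Speech'), ('simile', 'Figures of Speech'),
--     ('verb', 'Grammar'), ('sentence', 'Grammar'),
--     ('translation', 'Translation Principles'), ('translate', 'Translation Principles'),
--     ('meaning', 'Translation Principles'),
--     ('check', 'Quality Assurance'), ('review', 'Quality Assurance'), ('accuracy', 'Quality Assurance'),
--     ('team', 'Team Management'), ('leader', 'Team Management'), ('collaborate', 'Team Management'),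
--     ('culture', 'Cultural Context'), ('cultural', 'Cultural Context'), ('context', 'Cultural Context'),
--     ('church', 'Church Involvement'), ('pastor', 'Church Involvement'), ('leader', 'Church Involvement'),
--     ('source', 'Source Texts'), ('original', 'Source Texts'), ('hebrew', 'Source Texts'),
--     ('greek', 'Source Texts'),
-- ]
-- LABEL_ORDER = ['Figures of Speech', 'Grammar', 'Translation Principles', 'Quality Assurance',
--                'Team Management', 'Cultural Context', 'Church Involvement', 'Source Texts']
--
-- def get_key_concepts(article_id, content):
--     content_lower = content.lower()
--     hits = {label for prefix, label in ID_PREFIX_INDEX if prefix in article_id}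
--     hits |= {label for keyword, label in KEYWORD_INDEX if keyword in content_lower}
--     return [label for label in LABEL_ORDER if label in hits]
-- ===== Notes on version B (the rewrite author's own statement) =====
-- stated objective: alternative
-- what changed: Instead of eight per-concept conditional appends, B builds an inverted (pattern -> label) index, scans it once to collect the set of hit labels, and then filters a canonical label-order list by membership in that set.
import Mathlib
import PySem

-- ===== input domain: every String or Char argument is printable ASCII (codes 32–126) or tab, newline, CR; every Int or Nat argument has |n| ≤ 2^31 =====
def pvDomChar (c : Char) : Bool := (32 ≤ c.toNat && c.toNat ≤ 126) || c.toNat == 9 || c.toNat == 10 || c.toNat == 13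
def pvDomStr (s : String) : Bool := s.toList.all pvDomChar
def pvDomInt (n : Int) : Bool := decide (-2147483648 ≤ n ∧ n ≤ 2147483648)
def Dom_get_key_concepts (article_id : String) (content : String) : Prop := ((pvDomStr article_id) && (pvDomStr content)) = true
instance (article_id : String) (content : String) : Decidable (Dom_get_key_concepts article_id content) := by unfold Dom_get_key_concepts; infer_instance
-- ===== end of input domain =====

-- B inverts A's per-concept branches into a (pattern -> label) index scanned once into a hit set, then filters the canonical label order by membership (objective: alternative decomposition).


-- ===== PORT A =====
def get_key_concepts (article_id : String) (content : String) : List String :=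
  let concepts : List String := []
  let content_lower := PySem.Str.lower content
  let concepts := if PySem.Str.isIn "figs-" article_id
      || ["metaphor", "simile"].any (fun word => PySem.Str.isIn word content_lower)
    then concepts ++ ["Figures of Speech"] else concepts
  let concepts := if PySem.Str.isIn "grammar-" article_id
      || ["verb", "sentence"].any (fun word => PySem.Str.isIn word content_lower)
    then concepts ++ ["Grammar"] else concepts
  let concepts := if ["translation", "translate", "meaning"].any (fun word => PySem.Str.isIn word content_lower)
    then concepts ++ ["Translation Principles"] else concepts
  let concepts := if ["check", "review", "accuracy"].any (fun word => PySem.Str.isIn word content_lower)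
    then concepts ++ ["Quality Assurance"] else concepts
  let concepts := if ["team", "leader", "collaborate"].any (fun word => PySem.Str.isIn word content_lower)
    then concepts ++ ["Team Management"] else concepts
  let concepts := if ["culture", "cultural", "context"].any (fun word => PySem.Str.isIn word content_lower)
    then concepts ++ ["Cultural Context"] else concepts
  let concepts := if ["church", "pastor", "leader"].any (fun word => PySem.Str.isIn word content_lower)
    then concepts ++ ["Church Involvement"] else concepts
  let concepts := if ["source", "original", "hebrew", "greek"].any (fun word => PySem.Str.isIn word content_lower)
    then concepts ++ ["Source Texts"] else concepts
  concepts

-- ===== PORT B =====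
def pvIdPrefixIndex : List (String × String) :=
  [("figs-", "Figures of Speech"), ("grammar-", "Grammar")]

def pvKeywordIndex : List (String × String) :=
  [("metaphor", "Figures of Speech"), ("simile", "Figures of Speech"),
   ("verb", "Grammar"), ("sentence", "Grammar"),
   ("translation", "Translation Principles"), ("translate", "Translation Principles"),
   ("meaning", "Translation Principles"),
   ("check", "Quality Assurance"), ("review", "Quality Assurance"), ("accuracy", "Quality Assurance"),
   ("team", "Team Management"), ("leader", "Team Management"), ("collaborate", "Team Management"),
   ("culture", "Cultural Context"), ("cultural", "Cultural Context"), ("context", "Cultural Context"),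
   ("church", "Church Involvement"), ("pastor", "Church Involvement"), ("leader", "Church Involvement"),
   ("source", "Source Texts"), ("original", "Source Texts"), ("hebrew", "Source Texts"),
   ("greek", "Source Texts")]

def pvLabelOrder : List String :=
  ["Figures of Speech", "Grammar", "Translation Principles", "Quality Assurance",
   "Team Management", "Cultural Context", "Church Involvement", "Source Texts"]

-- the set of labels hit by an id-prefix or a keyword ('hits' in Source B)
def pvHitLabels (article_id : String) (content_lower : String) : PySem.Set String :=
  PySem.Set.union
    (PySem.Set.ofList ((pvIdPrefixIndex.filter (fun pr => PySem.Str.isIn pr.1 article_id)).map Prod.snd))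
    (PySem.Set.ofList ((pvKeywordIndex.filter (fun kw => PySem.Str.isIn kw.1 content_lower)).map Prod.snd))

def get_key_concepts_alt (article_id : String) (content : String) : List String :=
  let content_lower := PySem.Str.lower content
  let hits := pvHitLabels article_id content_lower
  pvLabelOrder.filter (fun label => PySem.Set.contains hits label)

-- ===== PRECONDITION & SPEC =====
def Spec_get_key_concepts (article_id : String) (content : String) (out : List String) : Prop := out = get_key_concepts_alt article_id content
instance (article_id : String) (content : String) (out : List String) : Decidable (Spec_get_key_concepts article_id content out) := by unfold Spec_get_key_concepts; infer_instance

-- ===== CLAIM (what is proved, stated in full; the proofs are below) =====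
def Claim_equal_get_key_concepts : Prop := ∀ (article_id : String) (content : String), Dom_get_key_concepts article_id content → Spec_get_key_concepts article_id content (get_key_concepts article_id content)

-- ===== LEMMAS AND PROOFS =====

lemma pv_contains_hit (aid cl l : String) :
    PySem.Set.contains (pvHitLabels aid cl) l = true ↔
      ((∃ pr ∈ pvIdPrefixIndex, PySem.Str.isIn pr.1 aid = true ∧ pr.2 = l) ∨
       (∃ kw ∈ pvKeywordIndex, PySem.Str.isIn kw.1 cl = true ∧ kw.2 = l)) := by
  rw [PySem.Set.contains_iff]
  unfold pvHitLabels
  rw [PySem.Set.mem_union]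
  simp [PySem.Set.mem_ofList, List.mem_filter]

lemma pv_hit_figs (aid cl : String) :
    PySem.Set.contains (pvHitLabels aid cl) "Figures of Speech"
      = (PySem.Str.isIn "figs-" aid || (PySem.Str.isIn "metaphor" cl || PySem.Str.isIn "simile" cl)) := by
  rw [Bool.eq_iff_iff, pv_contains_hit]
  simp [pvIdPrefixIndex, pvKeywordIndex]

lemma pv_hit_grammar (aid cl : String) :
    PySem.Set.contains (pvHitLabels aid cl) "Grammar"
      = (PySem.Str.isIn "grammar-" aid || (PySem.Str.isIn "verb" cl || PySem.Str.isIn "sentence" cl)) := by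
  rw [Bool.eq_iff_iff, pv_contains_hit]
  simp [pvIdPrefixIndex, pvKeywordIndex]

lemma pv_hit_translation (aid cl : String) :
    PySem.Set.contains (pvHitLabels aid cl) "Translation Principles"
      = (PySem.Str.isIn "translation" cl || (PySem.Str.isIn "translate" cl || PySem.Str.isIn "meaning" cl)) := by
  rw [Bool.eq_iff_iff, pv_contains_hit]
  simp [pvIdPrefixIndex, pvKeywordIndex]

lemma pv_hit_quality (aid cl : String) :
    PySem.Set.contains (pvHitLabels aid cl) "Quality Assurance"
      = (PySem.Str.isIn "check" cl || (PySem.Str.isIn "review" cl || PySem.Str.isIn "accuracy" cl)) := by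
  rw [Bool.eq_iff_iff, pv_contains_hit]
  simp [pvIdPrefixIndex, pvKeywordIndex]

lemma pv_hit_team (aid cl : String) :
    PySem.Set.contains (pvHitLabels aid cl) "Team Management"
      = (PySem.Str.isIn "team" cl || (PySem.Str.isIn "leader" cl || PySem.Str.isIn "collaborate" cl)) := by
  rw [Bool.eq_iff_iff, pv_contains_hit]
  simp [pvIdPrefixIndex, pvKeywordIndex]

lemma pv_hit_culture (aid cl : String) :
    PySem.Set.contains (pvHitLabels aid cl) "Cultural Context"
      = (PySem.Str.isIn "culture" cl || (PySem.Str.isIn "cultural" cl || PySem.Str.isIn "context" cl)) := by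
  rw [Bool.eq_iff_iff, pv_contains_hit]
  simp [pvIdPrefixIndex, pvKeywordIndex]

lemma pv_hit_church (aid cl : String) :
    PySem.Set.contains (pvHitLabels aid cl) "Church Involvement"
      = (PySem.Str.isIn "church" cl || (PySem.Str.isIn "pastor" cl || PySem.Str.isIn "leader" cl)) := by
  rw [Bool.eq_iff_iff, pv_contains_hit]
  simp [pvIdPrefixIndex, pvKeywordIndex]

lemma pv_hit_source (aid cl : String) :
    PySem.Set.contains (pvHitLabels aid cl) "Source Texts"
      = (PySem.Str.isIn "source" cl || (PySem.Str.isIn "original" cl || (PySem.Str.isIn "hebrew" cl || PySem.Str.isIn "greek" cl))) := by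
  rw [Bool.eq_iff_iff, pv_contains_hit]
  simp [pvIdPrefixIndex, pvKeywordIndex]

-- ===== VERDICT (by name: the statement is the Claim_ definition above) =====
lemma pv_chain (b1 b2 b3 b4 b5 b6 b7 b8 : Bool) (l1 l2 l3 l4 l5 l6 l7 l8 : String) :
    (let c0 : List String := []
     let c1 := if b1 = true then c0 ++ [l1] else c0
     let c2 := if b2 = true then c1 ++ [l2] else c1
     let c3 := if b3 = true then c2 ++ [l3] else c2
     let c4 := if b4 = true then c3 ++ [l4] else c3
     let c5 := if b5 = true then c4 ++ [l5] else c4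
     let c6 := if b6 = true then c5 ++ [l6] else c5
     let c7 := if b7 = true then c6 ++ [l7] else c6
     let c8 := if b8 = true then c7 ++ [l8] else c7
     c8)
    = (if b1 = true then [l1] else []) ++ (if b2 = true then [l2] else [])
      ++ (if b3 = true then [l3] else []) ++ (if b4 = true then [l4] else [])
      ++ (if b5 = true then [l5] else []) ++ (if b6 = true then [l6] else [])
      ++ (if b7 = true then [l7] else []) ++ (if b8 = true then [l8] else []) := by
  cases b1 <;> cases b2 <;> cases b3 <;> cases b4 <;> cases b5 <;> cases b6 <;> cases b7 <;> cases b8 <;> rfl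

set_option maxHeartbeats 2000000 in
lemma pv_filter8 (p : String → Bool) (l1 l2 l3 l4 l5 l6 l7 l8 : String) :
    List.filter p [l1, l2, l3, l4, l5, l6, l7, l8]
    = (if p l1 = true then [l1] else []) ++ (if p l2 = true then [l2] else [])
      ++ (if p l3 = true then [l3] else []) ++ (if p l4 = true then [l4] else [])
      ++ (if p l5 = true then [l5] else []) ++ (if p l6 = true then [l6] else [])
      ++ (if p l7 = true then [l7] else []) ++ (if p l8 = true then [l8] else []) := by
  simp only [List.filter_cons, List.filter_nil]
  split_ifs <;> rfl

-- ===== VERDICT (by name: the statement is the Claim_ definition above) =====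
theorem get_key_concepts_spec : Claim_equal_get_key_concepts := by
  intro aid c _
  show get_key_concepts aid c = get_key_concepts_alt aid c
  rw [show get_key_concepts_alt aid c
        = List.filter (fun label => PySem.Set.contains (pvHitLabels aid (PySem.Str.lower c)) label) pvLabelOrder
      from rfl]
  rw [pvLabelOrder, pv_filter8]
  simp only [pv_hit_figs, pv_hit_grammar, pv_hit_translation, pv_hit_quality, pv_hit_team,
    pv_hit_culture, pv_hit_church, pv_hit_source]
  rw [show get_key_concepts aid c = _ from pv_chain
    (PySem.Str.isIn "figs-" aid || ["metaphor", "simile"].any (fun word => PySem.Str.isIn word (PySem.Str.lower c)))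
    (PySem.Str.isIn "grammar-" aid || ["verb", "sentence"].any (fun word => PySem.Str.isIn word (PySem.Str.lower c)))
    (["translation", "translate", "meaning"].any (fun word => PySem.Str.isIn word (PySem.Str.lower c)))
    (["check", "review", "accuracy"].any (fun word => PySem.Str.isIn word (PySem.Str.lower c)))
    (["team", "leader", "collaborate"].any (fun word => PySem.Str.isIn word (PySem.Str.lower c)))
    (["culture", "cultural", "context"].any (fun word => PySem.Str.isIn word (PySem.Str.lower c)))
    (["church", "pastor", "leader"].any (fun word => PySem.Str.isIn word (PySem.Str.lower c)))
    (["source", "original", "hebrew", "greek"].any (fun word => PySem.Str.isIn word (PySem.Str.lower c)))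
    "Figures of Speech" "Grammar" "Translation Principles" "Quality Assurance"
    "Team Management" "Cultural Context" "Church Involvement" "Source Texts"]
  simp only [List.any_cons, List.any_nil, Bool.or_false, List.append_assoc]
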